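-- pv_equiv track=rewrite | github.com/deeagalbin/congenial-bassoon | evaluare.py | Kronecker_function
-- ===== SOURCE A (Python) =====
-- def Kronecker_function(comunitati, node_i, node_j):
--     community_i = None
--     community_j = None
--     ok = False
--     for k in range(len(comunitati)):
--         if node_i in comunitati[k]:
--             community_i = k
--         if node_j in comunitati[k]:
--             community_j = k
--     if community_i == community_j:
--         ok = True
--     return ok
-- ===== SOURCE B (Python) =====
-- def Kronecker_function(comunitati, node_i, node_j):
--     # Scan communities from last to first and decide at the first community
--     # that mentions either node: since the last occurrence is the one that
--     # counts, the nodes share a community iff that community contains both.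
--     for com in reversed(comunitati):
--         has_i = node_i in com
--         has_j = node_j in com
--         if has_i or has_j:
--             return has_i and has_j
--     return True
-- ===== Notes on version B (the rewrite author's own statement) =====
-- stated objective: simpler
-- what changed: B scans the communities in reverse with an early exit, deciding at the first community that mentions either node (both present -> True, one -> False, none anywhere -> True), instead of A's full forward pass tracking two last-seen community indices and comparing them at the end.
import Mathlib
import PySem

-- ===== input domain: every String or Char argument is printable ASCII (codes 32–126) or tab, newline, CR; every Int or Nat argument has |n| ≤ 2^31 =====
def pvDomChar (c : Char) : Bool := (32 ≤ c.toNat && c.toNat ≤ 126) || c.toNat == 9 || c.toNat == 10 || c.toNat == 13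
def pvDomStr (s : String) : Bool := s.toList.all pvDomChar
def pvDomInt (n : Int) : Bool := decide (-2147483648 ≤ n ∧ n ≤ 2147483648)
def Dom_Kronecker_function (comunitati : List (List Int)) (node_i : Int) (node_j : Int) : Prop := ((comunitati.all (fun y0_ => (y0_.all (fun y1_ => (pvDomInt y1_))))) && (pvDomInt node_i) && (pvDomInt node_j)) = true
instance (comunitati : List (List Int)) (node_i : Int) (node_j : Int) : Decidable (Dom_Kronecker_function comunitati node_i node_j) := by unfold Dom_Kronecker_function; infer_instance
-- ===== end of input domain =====

-- B replaces A's full forward pass (tracking two last-seen community indices and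
-- comparing them at the end) by a reverse scan that decides at the first
-- community mentioning either node; objective: simpler.

-- ===== PORT A =====
-- loop 'for k in range(len(comunitati))' carrying (community_i, community_j)
def Kronecker_function (comunitati : List (List Int)) (node_i : Int) (node_j : Int) : Bool :=
  let p := (PySem.List.pyRange 0 (PySem.List.len comunitati) 1).foldl
    (fun (s : Option Int × Option Int) k =>
      let com := PySem.List.pyGetD comunitati k []   -- comunitati[k]; k always in range here
      (if node_i ∈ com then some k else s.1,
       if node_j ∈ com then some k else s.2))
    (none, none)
  if p.1 = p.2 then true else false

-- ===== PORT B =====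
-- 'for com in reversed(comunitati): … return/…' with early exit
def krAltLoop (node_i node_j : Int) : List (List Int) → Bool
  | [] => true
  | com :: rest =>
    let has_i := decide (node_i ∈ com)
    let has_j := decide (node_j ∈ com)
    if has_i || has_j then has_i && has_j
    else krAltLoop node_i node_j rest

def Kronecker_function_alt (comunitati : List (List Int)) (node_i : Int) (node_j : Int) : Bool :=
  krAltLoop node_i node_j comunitati.reverse

-- ===== PRECONDITION & SPEC =====
def Spec_Kronecker_function (comunitati : List (List Int)) (node_i : Int) (node_j : Int) (out : Bool) : Prop := out = Kronecker_function_alt comunitati node_i node_j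
instance (comunitati : List (List Int)) (node_i : Int) (node_j : Int) (out : Bool) : Decidable (Spec_Kronecker_function comunitati node_i node_j out) := by unfold Spec_Kronecker_function; infer_instance

-- ===== CLAIM =====
def Claim_equal_Kronecker_function : Prop := ∀ (comunitati : List (List Int)) (node_i : Int) (node_j : Int), Dom_Kronecker_function comunitati node_i node_j → Spec_Kronecker_function comunitati node_i node_j (Kronecker_function comunitati node_i node_j)

-- ===== LEMMAS AND PROOFS =====

-- the index of the LAST pair whose community contains x (A's 'community_i/_j')
def lastIdx (x : Int) : List (Int × List Int) → Option Int
  | [] => none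
  | (k, com) :: rest =>
    match lastIdx x rest with
    | some r => some r
    | none => if x ∈ com then some k else none

theorem lastIdx_append (x : Int) (l : List (Int × List Int)) (k : Int) (com : List Int) :
    lastIdx x (l ++ [(k, com)]) = if x ∈ com then some k else lastIdx x l := by
  induction l with
  | nil => simp [lastIdx]
  | cons p rest ih =>
    obtain ⟨k', c'⟩ := p
    simp only [List.cons_append, lastIdx, ih]
    by_cases hx : x ∈ com
    · simp [hx]
    · simp [hx]

theorem lastIdx_mem (x : Int) (l : List (Int × List Int)) (r : Int)
    (h : lastIdx x l = some r) : ∃ p ∈ l, p.1 = r := by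
  induction l with
  | nil => simp [lastIdx] at h
  | cons p rest ih =>
    obtain ⟨k, com⟩ := p
    simp only [lastIdx] at h
    rcases hr : lastIdx x rest with _ | r'
    · rw [hr] at h
      split_ifs at h with hx
      · exact ⟨(k, com), by simp, by simpa using h⟩
    · rw [hr] at h
      simp only [Option.some.injEq] at h
      obtain ⟨q, hq, hq1⟩ := ih (h ▸ hr)
      exact ⟨q, List.mem_cons_of_mem _ hq, hq1⟩

-- A's fold over (index, community) pairs computes lastIdx for each node
theorem fold_eq_lastIdx (node_i node_j : Int) (l : List (Int × List Int))
    (s : Option Int × Option Int) :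
    l.foldl (fun (s : Option Int × Option Int) p =>
        (if node_i ∈ p.2 then some p.1 else s.1,
         if node_j ∈ p.2 then some p.1 else s.2)) s
      = ((lastIdx node_i l).or s.1, (lastIdx node_j l).or s.2) := by
  induction l generalizing s with
  | nil => simp [lastIdx]
  | cons p rest ih =>
    obtain ⟨k, com⟩ := p
    simp only [List.foldl_cons, ih, lastIdx, Prod.mk.injEq]
    refine ⟨?_, ?_⟩ <;>
    · rcases h : lastIdx _ rest with _ | r
      · simp; split_ifs <;> simp
      · simp

-- B's reverse early-exit scan decides equality of the two lastIdx values,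
-- given that the pair indices are strictly increasing
theorem krAltLoop_eq (node_i node_j : Int) (l : List (Int × List Int))
    (hp : l.Pairwise (fun p q => p.1 < q.1)) :
    krAltLoop node_i node_j (l.map Prod.snd).reverse
      = decide (lastIdx node_i l = lastIdx node_j l) := by
  induction l using List.reverseRecOn with
  | nil => simp [krAltLoop, lastIdx]
  | append_singleton l p ih =>
    obtain ⟨k, com⟩ := p
    rw [List.pairwise_append] at hp
    have hlt : ∀ q ∈ l, q.1 < k := fun q hq => hp.2.2 q hq (k, com) (by simp)
    simp only [List.map_append, List.map_cons, List.map_nil, List.reverse_append,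
      List.reverse_cons, List.reverse_nil, List.nil_append, List.cons_append]
    simp only [lastIdx_append, krAltLoop]
    by_cases hi : node_i ∈ com <;> by_cases hj : node_j ∈ com
    · simp [hi, hj]
    · have hne : some k ≠ lastIdx node_j l := by
        rcases h : lastIdx node_j l with _ | r
        · simp
        · obtain ⟨q, hq, hq1⟩ := lastIdx_mem _ _ _ h
          have := hlt q hq
          intro hcon
          simp only [Option.some.injEq] at hcon
          omega
      simp [hi, hj, hne]
    · have hne : lastIdx node_i l ≠ some k := by
        rcases h : lastIdx node_i l with _ | r
        · simp
        · obtain ⟨q, hq, hq1⟩ := lastIdx_mem _ _ _ h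
          have := hlt q hq
          intro hcon
          simp only [Option.some.injEq] at hcon
          omega
      simp [hi, hj, hne]
    · simpa [hi, hj] using ih hp.1

-- ===== VERDICT =====
theorem Kronecker_function_spec : Claim_equal_Kronecker_function := by
  intro c i j _
  unfold Spec_Kronecker_function Kronecker_function Kronecker_function_alt
  have hmap : (PySem.List.pyRange 0 (PySem.List.len c) 1).foldl
      (fun (s : Option Int × Option Int) k =>
        let com := PySem.List.pyGetD c k []
        (if i ∈ com then some k else s.1, if j ∈ com then some k else s.2))
      (none, none)
      = (PySem.List.enumerate c 0).foldl
        (fun (s : Option Int × Option Int) p =>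
          (if i ∈ p.2 then some p.1 else s.1, if j ∈ p.2 then some p.1 else s.2))
        (none, none) := by
    rw [PySem.List.enumerate_eq_map_pyRange (d := []), List.foldl_map]
  rw [hmap, fold_eq_lastIdx]
  have hrev : c.reverse = ((PySem.List.enumerate c 0).map Prod.snd).reverse := by
    rw [PySem.List.map_snd_enumerate]
  rw [hrev, krAltLoop_eq i j _ (PySem.List.pairwise_lt_enumerate c 0)]
  simp only [Option.or_none]
  split_ifs with h <;> simp [h]
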